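-- pv_equiv track=rewrite | github.com/anacarlaaf/mdp_estrelas_alem_do_tempo | 06_01_Treino_MaratonaUSP/j_raphael_singer.py | verificar_idades
-- ===== SOURCE A (Python) =====
-- def verificar_idades(n, albuns):
--     anos_possiveis_nascimento = set()
--
--     for album in albuns:
--         ano = album[0]
--         idade = album[1]
--         ano_nascimento = ano - idade
--         anos_possiveis_nascimento.add(ano_nascimento)
--
--     if len(anos_possiveis_nascimento) == 1:
--         return "idades corretas"
--     else:
--         return "mentiu a idade"
-- ===== SOURCE B (Python) =====
-- def verificar_idades(n, albuns):
--     if not albuns: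
--         return "mentiu a idade"
--     ref = albuns[0][0] - albuns[0][1]
--     if all(ano - idade == ref for ano, idade in albuns[1:]):
--         return "idades corretas"
--     return "mentiu a idade"
-- ===== Notes on version B (the rewrite author's own statement) =====
-- stated objective: simpler
-- what changed: Instead of accumulating a set of candidate birth years and testing its cardinality, B takes the first album's birth year as a reference and short-circuits with all() over the rest; the empty list is handled explicitly.
import Mathlib
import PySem

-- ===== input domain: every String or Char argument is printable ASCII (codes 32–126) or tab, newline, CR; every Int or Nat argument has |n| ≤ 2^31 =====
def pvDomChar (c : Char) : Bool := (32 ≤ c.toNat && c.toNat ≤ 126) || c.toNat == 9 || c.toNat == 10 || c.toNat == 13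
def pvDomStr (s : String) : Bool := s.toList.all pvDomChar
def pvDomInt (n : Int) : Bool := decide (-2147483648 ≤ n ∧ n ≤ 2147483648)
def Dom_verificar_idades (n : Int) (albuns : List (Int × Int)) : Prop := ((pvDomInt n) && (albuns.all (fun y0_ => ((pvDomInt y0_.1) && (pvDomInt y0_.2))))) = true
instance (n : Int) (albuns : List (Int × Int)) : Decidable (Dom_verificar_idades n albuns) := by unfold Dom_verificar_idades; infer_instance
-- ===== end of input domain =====

-- B replaces A's set-of-birth-years accumulation by a first-album reference value checked with a short-circuit all(); objective: simpler.


-- ===== PORT A =====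
def verificar_idades (n : Int) (albuns : List (Int × Int)) : String :=
  let anos : PySem.Set Int :=
    albuns.foldl (fun s album =>
      let ano := album.1
      let idade := album.2
      let ano_nascimento := ano - idade
      PySem.Set.add s ano_nascimento) PySem.Set.empty
  if PySem.Set.len anos = 1 then "idades corretas" else "mentiu a idade"

-- ===== PORT B =====
def verificar_idades_alt (n : Int) (albuns : List (Int × Int)) : String :=
  match albuns with
  | [] => "mentiu a idade"
  | (ano, idade) :: rest =>
    let ref := ano - idade
    if rest.all (fun p => p.1 - p.2 == ref) then "idades corretas" else "mentiu a idade"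

-- ===== PRECONDITION & SPEC =====
def Spec_verificar_idades (n : Int) (albuns : List (Int × Int)) (out : String) : Prop := out = verificar_idades_alt n albuns
instance (n : Int) (albuns : List (Int × Int)) (out : String) : Decidable (Spec_verificar_idades n albuns out) := by unfold Spec_verificar_idades; infer_instance

-- ===== CLAIM (what is proved, stated in full; the proofs are below) =====
def Claim_equal_verificar_idades : Prop := ∀ (n : Int) (albuns : List (Int × Int)), Dom_verificar_idades n albuns → Spec_verificar_idades n albuns (verificar_idades n albuns)

-- ===== LEMMAS AND PROOFS =====

-- folding Set.add only ever appends elements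
theorem pv_foldl_add_append (l : List (Int × Int)) (s : PySem.Set Int) :
    ∃ u, l.foldl (fun s album => PySem.Set.add s (album.1 - album.2)) s = s ++ u := by
  induction l generalizing s with
  | nil => exact ⟨[], by simp⟩
  | cons p t ih =>
    have hv : ∃ v, PySem.Set.add s (p.1 - p.2) = s ++ v := by
      by_cases h : p.1 - p.2 ∈ s
      · exact ⟨[], by simp [PySem.Set.add, PySem.Set.contains, h]⟩
      · exact ⟨[p.1 - p.2], by simp [PySem.Set.add, PySem.Set.contains, h]⟩
    obtain ⟨v, hv⟩ := hv
    obtain ⟨u, hu⟩ := ih (PySem.Set.add s (p.1 - p.2))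
    exact ⟨v ++ u, by rw [List.foldl_cons, hu, hv, List.append_assoc]⟩

-- from a singleton [r]: the fold stays [r] iff every element's birth year equals r
theorem pv_foldl_singleton (l : List (Int × Int)) (r : Int) :
    (l.foldl (fun s album => PySem.Set.add s (album.1 - album.2)) [r] = [r]
      ↔ l.all (fun p => p.1 - p.2 == r) = true) := by
  induction l with
  | nil => simp
  | cons p t ih =>
    by_cases h : p.1 - p.2 = r
    · have hadd : PySem.Set.add [r] (p.1 - p.2) = [r] := by simp [PySem.Set.add, h]
      rw [List.foldl_cons, hadd, ih]
      simp [h]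
    · constructor
      · intro hfold
        exfalso
        have hadd : PySem.Set.add [r] (p.1 - p.2) = [r, p.1 - p.2] := by
          simp [PySem.Set.add, h]
        rw [List.foldl_cons, hadd] at hfold
        obtain ⟨u, hu⟩ := pv_foldl_add_append t [r, p.1 - p.2]
        rw [hu] at hfold
        have := congrArg List.length hfold
        simp at this
      · intro hall
        simp [h] at hall

theorem verificar_idades_eq (n : Int) (albuns : List (Int × Int)) :
    verificar_idades n albuns = verificar_idades_alt n albuns := by
  cases albuns with
  | nil => simp [verificar_idades, verificar_idades_alt, PySem.Set.empty, PySem.Set.len]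
  | cons p t =>
    obtain ⟨ano, idade⟩ := p
    have hstart : PySem.Set.add (PySem.Set.empty : PySem.Set Int) (ano - idade) = [ano - idade] := by
      simp [PySem.Set.add, PySem.Set.empty]
    unfold verificar_idades verificar_idades_alt
    simp only [List.foldl_cons, hstart]
    by_cases h : t.all (fun p => p.1 - p.2 == ano - idade) = true
    · have hfold := (pv_foldl_singleton t (ano - idade)).mpr h
      simp [hfold, h, PySem.Set.len]
    · have hne : t.foldl (fun s album => PySem.Set.add s (album.1 - album.2)) [ano - idade] ≠ [ano - idade] := by
        intro hc; exact h ((pv_foldl_singleton t (ano - idade)).mp hc)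
      obtain ⟨u, hu⟩ := pv_foldl_add_append t [ano - idade]
      have hu0 : u ≠ [] := by
        intro hc; apply hne; rw [hu, hc]; simp
      have hlen2 : 2 ≤ (t.foldl (fun s album => PySem.Set.add s (album.1 - album.2)) [ano - idade]).length := by
        rw [hu]
        have := List.length_pos_iff.mpr hu0
        simp
        omega
      have hne1 : ¬ (PySem.Set.len (t.foldl (fun s album => PySem.Set.add s (album.1 - album.2)) [ano - idade]) = 1) := by
        simp [PySem.Set.len]
        omega
      rw [if_neg hne1]
      simp [h]

-- ===== VERDICT (by name: the statement is the Claim_ definition above) =====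
theorem verificar_idades_spec : Claim_equal_verificar_idades := by
  intro n albuns _
  exact verificar_idades_eq n albuns
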